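-- pv_equiv track=rewrite | github.com/fractioneater/flicker3 | src/script/generate-ast.py | render_includes
-- ===== SOURCE A (Python) =====
-- from typing import Iterable, List, Optional
--
-- def render_includes(includes: List[str]) -> str:
--   rendered = []
--   previous_kind: Optional[str] = None
--   for include in includes:
--     kind = "local" if include.startswith('"') else "system"
--     if rendered and kind != previous_kind:
--       rendered.append("")
--     rendered.append(f"#include {include}")
--     previous_kind = kind
--   return "\n".join(rendered)
-- ===== SOURCE B (Python) =====
-- from itertools import groupby
--
-- def render_includes(includes):
--   blocks = ("\n".join(f"#include {inc}" for inc in run)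
--             for _, run in groupby(includes, key=lambda inc: inc.startswith('"')))
--   return "\n\n".join(blocks)
-- ===== Notes on version B (the rewrite author's own statement) =====
-- stated objective: idiomatic
-- what changed: B splits the includes into maximal consecutive runs of the same kind with itertools.groupby and joins the per-run blocks with blank lines, instead of A's single fold that tracks the previous kind and pushes separator entries into one flat list.
import Mathlib
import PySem

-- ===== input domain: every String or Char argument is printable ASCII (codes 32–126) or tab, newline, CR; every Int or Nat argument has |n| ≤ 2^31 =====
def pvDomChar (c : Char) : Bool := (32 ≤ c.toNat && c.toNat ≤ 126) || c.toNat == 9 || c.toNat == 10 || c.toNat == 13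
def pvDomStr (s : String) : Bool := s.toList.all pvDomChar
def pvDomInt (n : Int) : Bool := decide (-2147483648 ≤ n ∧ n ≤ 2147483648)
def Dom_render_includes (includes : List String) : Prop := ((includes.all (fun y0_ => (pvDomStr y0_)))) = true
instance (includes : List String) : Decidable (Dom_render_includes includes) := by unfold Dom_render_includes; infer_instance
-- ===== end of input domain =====

-- B groups the includes into maximal consecutive runs of the same kind (groupby) and joins
-- the run blocks with blank lines, instead of A's single fold carrying the previous kind;
-- objective: idiomatic, same cost.

-- ===== PORT A =====
def render_includes (includes : List String) : String :=
  let st := includes.foldl (fun (st : List String × Option String) (include_ : String) =>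
      let kind := if PySem.Str.startswith include_ "\"" then "local" else "system"
      let rendered := if st.1 ≠ [] ∧ some kind ≠ st.2 then st.1 ++ [""] else st.1
      (rendered ++ ["#include " ++ include_], some kind)) ([], none)
  PySem.Str.join "\n" st.1

-- ===== PORT B =====
-- one maximal run of includes whose kind (startswith '"') equals k, and the remainder
def pvRun1 (k : Bool) : List String → List String × List String
  | [] => ([], [])
  | x :: xs =>
      if PySem.Str.startswith x "\"" = k then
        let p := pvRun1 k xs
        (x :: p.1, p.2)
      else ([], x :: xs)

theorem pvRun1_len (k : Bool) : ∀ xs : List String, (pvRun1 k xs).2.length ≤ xs.length := by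
  intro xs
  induction xs with
  | nil => simp [pvRun1]
  | cons x xs ih =>
      simp only [pvRun1]
      split
      · exact Nat.le_succ_of_le ih
      · simp

-- the transliteration of Source B's itertools.groupby on the kind key
def pvRuns : List String → List (List String)
  | [] => []
  | x :: xs =>
      let p := pvRun1 (PySem.Str.startswith x "\"") xs
      (x :: p.1) :: pvRuns p.2
termination_by xs => xs.length
decreasing_by exact Nat.lt_succ_of_le (pvRun1_len _ _)

def render_includes_alt (includes : List String) : String :=
  PySem.Str.join "\n\n"
    ((pvRuns includes).map (fun run => PySem.Str.join "\n" (run.map (fun inc => "#include " ++ inc))))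

-- ===== PRECONDITION & SPEC =====
def Spec_render_includes (includes : List String) (out : String) : Prop := out = render_includes_alt includes
instance (includes : List String) (out : String) : Decidable (Spec_render_includes includes out) := by unfold Spec_render_includes; infer_instance

-- ===== CLAIM (what is proved, stated in full; the proofs are below) =====
def Claim_equal_render_includes : Prop := ∀ (includes : List String), Dom_render_includes includes → Spec_render_includes includes (render_includes includes)

-- ===== LEMMAS AND PROOFS =====

def pvKey (x : String) : Bool := PySem.Str.startswith x "\""
def pvLine (x : String) : String := "#include " ++ x
def pvKind (k : Bool) : String := if k then "local" else "system"

theorem pvKind_inj (a b : Bool) : pvKind a = pvKind b ↔ a = b := by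
  cases a <;> cases b <;> simp [pvKind]

-- the lines A appends after the first element, given the previous kind k
def pvTail (k : Bool) : List String → List String
  | [] => []
  | x :: xs => (if pvKey x = k then [] else [""]) ++ [pvLine x] ++ pvTail (pvKey x) xs

def pvStep (st : List String × Option String) (include_ : String) : List String × Option String :=
  let kind := if PySem.Str.startswith include_ "\"" then "local" else "system"
  let rendered := if st.1 ≠ [] ∧ some kind ≠ st.2 then st.1 ++ [""] else st.1
  (rendered ++ ["#include " ++ include_], some kind)

theorem renderA_fold (includes : List String) :
    render_includes includes = PySem.Str.join "\n" (List.foldl pvStep ([], none) includes).1 := rfl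

theorem pvStep_eq (acc : List String) (k : Bool) (x : String) (h : acc ≠ []) :
    pvStep (acc, some (pvKind k)) x
      = (acc ++ (if pvKey x = k then [] else [""]) ++ [pvLine x], some (pvKind (pvKey x))) := by
  have e1 : (if PySem.Str.startswith x "\"" then "local" else "system") = pvKind (pvKey x) := rfl
  simp only [pvStep]
  rw [e1]
  by_cases hk : pvKey x = k
  · rw [hk]
    simp [pvLine]
  · have hne : some (pvKind (pvKey x)) ≠ some (pvKind k) := by
      simpa [pvKind_inj] using hk
    simp [h, hne, hk, pvLine]

theorem pvFoldA : ∀ (xs acc : List String) (k : Bool), acc ≠ [] →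
    (List.foldl pvStep (acc, some (pvKind k)) xs).1 = acc ++ pvTail k xs := by
  intro xs
  induction xs with
  | nil => intro acc k h; simp [pvTail]
  | cons x xs ih =>
      intro acc k h
      rw [List.foldl_cons, pvStep_eq acc k x h, ih _ (pvKey x) (by simp), pvTail]
      simp

theorem renderA_cons (x : String) (xs : List String) :
    render_includes (x :: xs) = PySem.Str.join "\n" (pvLine x :: pvTail (pvKey x) xs) := by
  rw [renderA_fold, List.foldl_cons]
  have h1 : pvStep ([], none) x = ([pvLine x], some (pvKind (pvKey x))) := by
    simp [pvStep, pvLine, pvKind, pvKey]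
  rw [h1, pvFoldA xs [pvLine x] (pvKey x) (by simp)]
  rfl

-- unfolding lemmas in terms of pvKey
theorem pvRun1_cons_pos (k : Bool) (x : String) (xs : List String) (hk : pvKey x = k) :
    pvRun1 k (x :: xs) = (x :: (pvRun1 k xs).1, (pvRun1 k xs).2) := by
  simp only [pvRun1, if_pos (show PySem.Str.startswith x "\"" = k from hk)]

theorem pvRun1_cons_neg (k : Bool) (x : String) (xs : List String) (hk : ¬ pvKey x = k) :
    pvRun1 k (x :: xs) = ([], x :: xs) := by
  simp only [pvRun1, if_neg (show ¬ PySem.Str.startswith x "\"" = k from hk)]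

theorem pvRuns_cons (x : String) (xs : List String) :
    pvRuns (x :: xs) = (x :: (pvRun1 (pvKey x) xs).1) :: pvRuns ((pvRun1 (pvKey x) xs).2) := by
  simp only [pvRuns, pvKey]

-- pvRun1 consumes a maximal same-kind prefix: its remainder starts with a different kind
theorem pvRun1_snd_key (k : Bool) : ∀ (xs : List String) (y : String) (ys : List String),
    (pvRun1 k xs).2 = y :: ys → pvKey y ≠ k := by
  intro xs
  induction xs with
  | nil => intro y ys h; simp [pvRun1] at h
  | cons x xs ih =>
      intro y ys h
      by_cases hk : pvKey x = k
      · rw [pvRun1_cons_pos k x xs hk] at h; exact ih y ys h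
      · rw [pvRun1_cons_neg k x xs hk] at h
        cases h; exact hk

theorem pvTail_run1 (k : Bool) : ∀ xs : List String,
    pvTail k xs = (pvRun1 k xs).1.map pvLine ++ pvTail k (pvRun1 k xs).2 := by
  intro xs
  induction xs with
  | nil => simp [pvRun1]
  | cons x xs ih =>
      by_cases hk : pvKey x = k
      · rw [pvRun1_cons_pos k x xs hk]
        simp only [pvTail, if_pos hk, List.map_cons]
        simpa [hk] using ih
      · rw [pvRun1_cons_neg k x xs hk]
        simp

theorem pvRuns_ne_nil : ∀ (xs : List String), ∀ l ∈ pvRuns xs, l ≠ [] := by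
  intro xs
  induction xs using pvRuns.induct with
  | case1 => intro l hl; simp [pvRuns] at hl
  | case2 x xs p ih =>
      intro l hl
      rw [pvRuns] at hl
      rcases List.mem_cons.mp hl with h1 | h1
      · subst h1; simp
      · exact ih l h1

-- A's rendered lines equal the [""]-intercalation of B's run line-blocks
theorem intercalate_cc {α : Type} (s p q : List α) (r : List (List α)) :
    List.intercalate s (p :: q :: r) = p ++ s ++ List.intercalate s (q :: r) := by
  simp [List.intercalate]

-- A's rendered lines equal the [""]-intercalation of B's run line-blocks
theorem pvMain : ∀ (n : Nat) (xs : List String), xs.length ≤ n → ∀ x : String,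
    List.intercalate [""] ((pvRuns (x :: xs)).map (List.map pvLine)) = pvLine x :: pvTail (pvKey x) xs := by
  intro n
  induction n with
  | zero =>
      intro xs hlen x
      have : xs = [] := List.eq_nil_of_length_eq_zero (Nat.le_zero.mp hlen)
      subst this
      simp [pvRuns, pvRun1, pvTail, List.intercalate]
  | succ n ih =>
      intro xs hlen x
      rcases hrest : (pvRun1 (pvKey x) xs).2 with _ | ⟨y, ys⟩
      · -- no remainder: a single run
        have h1 : pvTail (pvKey x) xs = (pvRun1 (pvKey x) xs).1.map pvLine := by
          rw [pvTail_run1, hrest]; simp [pvTail]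
      
        rw [pvRuns_cons x xs, hrest, h1]
        simp [pvRuns, List.intercalate]
      · -- remainder y :: ys, a new group starts
        have hys : ys.length ≤ n := by
          have := pvRun1_len (pvKey x) xs
          rw [hrest] at this
          simp at this
          omega
        have hIH := ih ys hys y
        have hkey : pvKey y ≠ pvKey x := pvRun1_snd_key (pvKey x) xs y ys hrest
        have htail : pvTail (pvKey x) xs
            = (pvRun1 (pvKey x) xs).1.map pvLine ++ [""] ++ [pvLine y] ++ pvTail (pvKey y) ys := by
          rw [pvTail_run1, hrest]
          simp [pvTail, hkey]
        obtain ⟨b, bs, hb⟩ := List.exists_cons_of_ne_nil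
          (show (pvRuns (y :: ys)).map (List.map pvLine) ≠ [] by rw [pvRuns_cons]; simp)
        rw [pvRuns_cons x xs, hrest, List.map_cons, hb, intercalate_cc, ← hb, hIH, htail]
        simp

theorem map_intersperse {α β : Type} (f : α → β) (s : α) : ∀ (xs : List α),
    List.map f (List.intersperse s xs) = List.intersperse (f s) (xs.map f) := by
  intro xs
  induction xs with
  | nil => simp
  | cons x xs ih =>
      cases xs with
      | nil => simp
      | cons y t => simpa [List.intersperse] using ih

theorem map_intercalate {α β : Type} (f : α → β) (s : List α) (xs : List (List α)) :
    List.intercalate (s.map f) (xs.map (List.map f)) = List.map f (List.intercalate s xs) := by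
  simp [List.intercalate, List.map_flatten, map_intersperse]

theorem intercalate_append_ne {α : Type} (s : List α) : ∀ (u v : List (List α)), u ≠ [] → v ≠ [] →
    List.intercalate s (u ++ v) = List.intercalate s u ++ s ++ List.intercalate s v := by
  intro u
  induction u with
  | nil => intro v h _; exact absurd rfl h
  | cons a u ih =>
      intro v _ hv
      cases u with
      | nil =>
          cases v with
          | nil => exact absurd rfl hv
          | cons b t => simp [List.intercalate]
      | cons a' u' =>
          have ihv := ih v (by simp) hv
          rw [show ((a :: a' :: u') ++ v) = a :: a' :: (u' ++ v) from rfl,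
              intercalate_cc s a a' (u' ++ v), intercalate_cc s a a' u',
              show (a' :: (u' ++ v)) = (a' :: u') ++ v from rfl, ihv]
          simp

theorem intercalate_head_ne {α : Type} (s : List α) (b : List α) (t : List (List α)) (hb : b ≠ []) :
    List.intercalate s (b :: t) ≠ [] := by
  cases t with
  | nil => simpa [List.intercalate]
  | cons c t' => simp [List.intercalate, hb]

theorem charsNest (c : Char) : ∀ (cls : List (List (List Char))), (∀ l ∈ cls, l ≠ []) →
    List.intercalate [c, c] (cls.map (List.intercalate [c])) = List.intercalate [c] (List.intercalate [[]] cls) := by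
  intro cls
  induction cls with
  | nil => intro _; simp [List.intercalate]
  | cons a cls ih =>
      intro hne
      cases cls with
      | nil => simp [List.intercalate]
      | cons b t =>
          have ha : a ≠ [] := hne a (by simp)
          have hb : b ≠ [] := hne b (by simp)
          have hL : List.intercalate [[]] (b :: t) ≠ [] := intercalate_head_ne [[]] b t hb
          rcases hm : List.intercalate [[]] (b :: t) with _ | ⟨m, M⟩
          · exact absurd hm hL
          have hIH := ih (fun l hl => hne l (by simp [hl]))
          rw [hm] at hIH
          have h1 : List.intercalate [[]] (a :: b :: t) = a ++ ([] :: m :: M) := by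
            simp [List.intercalate, List.intersperse]
            rcases t with _ | ⟨t0, t'⟩
            · simpa [List.intercalate] using hm
            · simpa [List.intercalate, List.intersperse] using hm
          rw [h1]
          have h2 : List.intercalate [c] (a ++ ([] :: m :: M))
              = List.intercalate [c] a ++ [c] ++ List.intercalate [c] ([] :: m :: M) :=
            intercalate_append_ne [c] a ([] :: m :: M) ha (by simp)
          rw [h2]
          have h3 : List.intercalate [c] (([] : List Char) :: m :: M)
              = [c] ++ List.intercalate [c] (m :: M) := by
            simp [List.intercalate, List.intersperse]
          rw [h3, ← hIH]
          simp [List.intercalate, List.intersperse]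

theorem joinNest (ls : List (List String)) (h : ∀ l ∈ ls, l ≠ []) :
    PySem.Str.join "\n\n" (ls.map (fun l => PySem.Str.join "\n" l))
      = PySem.Str.join "\n" (List.intercalate [""] ls) := by
  have hc : ∀ l ∈ ls.map (List.map String.toList), l ≠ [] := by
    intro l hl
    rcases List.mem_map.mp hl with ⟨l', hl', rfl⟩
    simpa using h l' hl'
  have key := charsNest '\n' (ls.map (List.map String.toList)) hc
  have hsep2 : "\n\n".toList = ['\n', '\n'] := by decide
  have hsep1 : "\n".toList = ['\n'] := by decide
  have hempty : "".toList = ([] : List Char) := by decide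
  simp only [PySem.Str.join, PySem.Chars.join, hsep1, hsep2]
  congr 1
  rw [List.map_map]
  have hmm : (String.toList ∘ fun l => String.ofList (List.intercalate ['\n'] (List.map String.toList l)))
      = fun l => List.intercalate ['\n'] (List.map String.toList l) := by
    funext l; simp
  rw [hmm,
      show (fun l => List.intercalate ['\n'] (List.map String.toList l))
        = (fun cl => List.intercalate ['\n'] cl) ∘ (List.map String.toList) from rfl,
      ← List.map_map, key]
  congr 1
  have hmi := map_intercalate String.toList [""] ls
  simpa [hempty] using hmi

-- ===== VERDICT (by name: the statement is the Claim_ definition above) =====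
theorem render_includes_spec : Claim_equal_render_includes := by
  intro includes _
  unfold Spec_render_includes
  cases includes with
  | nil => simp [render_includes, render_includes_alt, pvRuns, PySem.Str.join, PySem.Chars.join, List.intercalate]
  | cons x xs =>
      rw [renderA_cons, ← pvMain xs.length xs (le_refl _) x]
      unfold render_includes_alt
      have hmm : (pvRuns (x :: xs)).map (fun run => PySem.Str.join "\n" (run.map (fun inc => "#include " ++ inc)))
          = ((pvRuns (x :: xs)).map (List.map pvLine)).map (fun l => PySem.Str.join "\n" l) := by
        rw [List.map_map]; rfl
      rw [hmm, joinNest]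
      intro l hl
      rcases List.mem_map.mp hl with ⟨l', hl', rfl⟩
      simpa using pvRuns_ne_nil (x :: xs) l' hl'
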